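-- pv_equiv track=rewrite | github.com/luoxinglan/carla_example | mycarla/replay/process_log.py | parse_frame_blocks
-- ===== SOURCE A (Python) =====
-- def parse_frame_blocks(content):
--     """
--     分割内容
--
--     :param content:文件内容
--     """
--     frame_blocks = []
--     current_block = []
--     for line in content.split('\n'):
--         if line.startswith('Frame'):
--             # 如果当前块不为空，则将其添加到帧块列表中
--             if current_block:
--                 frame_blocks.append(current_block)
--             # 开始一个新的帧块
--             current_block = [line]
--         else:
--             # 将当前行添加到当前帧块中
--             current_block.append(line)
--     # 添加最后一个帧块（如果存在）
--     if current_block: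
--         frame_blocks.append(current_block)
--     return frame_blocks
-- ===== SOURCE B (Python) =====
-- def parse_frame_blocks(content):
--     """
--     分割内容
--
--     :param content:文件内容
--     """
--     lines = content.split('\n')
--     bounds = [i for i, line in enumerate(lines) if line.startswith('Frame')]
--     if not bounds:
--         return [lines]
--     head = [lines[:bounds[0]]] if bounds[0] > 0 else []
--     return head + [lines[b:e] for b, e in zip(bounds, bounds[1:] + [len(lines)])]
-- ===== Notes on version B (the rewrite author's own statement) =====
-- stated objective: alternative
-- what changed: Replaces the line-by-line accumulate-and-flush state machine with an index-then-slice decomposition: collect the indices of lines starting with 'Frame', then build the blocks by slicing between consecutive boundary indices.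
import Mathlib
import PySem

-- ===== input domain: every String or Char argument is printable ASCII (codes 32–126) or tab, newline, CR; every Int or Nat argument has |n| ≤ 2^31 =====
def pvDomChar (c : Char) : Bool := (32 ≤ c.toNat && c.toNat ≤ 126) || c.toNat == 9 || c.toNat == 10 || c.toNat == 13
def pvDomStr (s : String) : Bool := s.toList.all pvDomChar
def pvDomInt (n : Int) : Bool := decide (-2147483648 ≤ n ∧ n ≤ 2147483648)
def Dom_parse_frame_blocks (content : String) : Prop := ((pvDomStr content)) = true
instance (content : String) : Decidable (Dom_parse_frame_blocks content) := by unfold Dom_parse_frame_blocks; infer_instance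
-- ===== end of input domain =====

-- B replaces A's accumulate-and-flush state machine with an index-then-slice decomposition
-- (collect 'Frame' boundary indices, then slice between consecutive boundaries); same cost.

-- ===== PORT A =====
def parse_frame_blocks (content : String) : List (List String) :=
  let lines := (PySem.Str.split? content "\n").getD []
  let st := lines.foldl
    (fun (st : List (List String) × List String) line =>
      if PySem.Str.startswith line "Frame" then
        ((if st.2 ≠ [] then st.1 ++ [st.2] else st.1), [line])
      else
        (st.1, st.2 ++ [line]))
    ([], [])
  if st.2 ≠ [] then st.1 ++ [st.2] else st.1

-- ===== PORT B =====
def parse_frame_blocks_alt (content : String) : List (List String) :=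
  let lines := (PySem.Str.split? content "\n").getD []
  let bounds := (PySem.List.enumerate lines).filterMap
    (fun p => if PySem.Str.startswith p.2 "Frame" then some p.1 else none)
  match bounds with
  | [] => [lines]
  | b0 :: _ =>
    (if b0 > 0 then [PySem.List.slice lines none (some b0)] else []) ++
    (bounds.zip (PySem.List.slice bounds (some 1) none ++ [(lines.length : Int)])).map
      (fun be => PySem.List.slice lines (some be.1) (some be.2))

-- ===== PRECONDITION & SPEC =====
def Spec_parse_frame_blocks (content : String) (out : List (List String)) : Prop := out = parse_frame_blocks_alt content
instance (content : String) (out : List (List String)) : Decidable (Spec_parse_frame_blocks content out) := by unfold Spec_parse_frame_blocks; infer_instance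

-- ===== CLAIM (what is proved, stated in full; the proofs are below) =====
def Claim_equal_parse_frame_blocks : Prop := ∀ (content : String), Dom_parse_frame_blocks content → Spec_parse_frame_blocks content (parse_frame_blocks content)

-- ===== LEMMAS AND PROOFS =====

-- A's loop body and final flush, named for the proofs (definitionally the ones in the port).
def pvStep (st : List (List String) × List String) (line : String) : List (List String) × List String :=
  if PySem.Str.startswith line "Frame" then
    ((if st.2 ≠ [] then st.1 ++ [st.2] else st.1), [line])
  else
    (st.1, st.2 ++ [line])

def pvFinish (st : List (List String) × List String) : List (List String) :=
  if st.2 ≠ [] then st.1 ++ [st.2] else st.1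

-- Recursive characterisation of A's state machine (cur = pending block).
def pvR : List String → List String → List (List String)
  | cur, [] => if cur ≠ [] then [cur] else []
  | cur, l :: ls =>
    if PySem.Str.startswith l "Frame" then
      (if cur ≠ [] then [cur] else []) ++ pvR [l] ls
    else pvR (cur ++ [l]) ls

-- Nat-valued boundary indices (positions of lines starting with 'Frame').
def pvNB : List String → List Nat
  | [] => []
  | l :: ls =>
    if PySem.Str.startswith l "Frame" then 0 :: (pvNB ls).map (· + 1)
    else (pvNB ls).map (· + 1)

-- B's slice list, in Nat form.
def pvSlices (ls : List String) : List (List String) :=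
  ((pvNB ls).zip ((pvNB ls).drop 1 ++ [ls.length])).map (fun be => (ls.drop be.1).take (be.2 - be.1))

theorem pvGoNeNil (sep : List Char) (fuel : Nat) : ∀ (l cur : List Char) (acc : List (List Char)),
    PySem.Chars.splitOn.go sep fuel l cur acc ≠ [] := by
  induction fuel with
  | zero => intro l cur acc; simp [PySem.Chars.splitOn.go]
  | succ n ih =>
    intro l cur acc
    cases l with
    | nil => simp [PySem.Chars.splitOn.go]
    | cons c rest =>
      simp only [PySem.Chars.splitOn.go]
      split
      · exact ih _ _ _
      · exact ih _ _ _

theorem pvLinesNeNil (s : String) : (PySem.Str.split? s "\n").getD [] ≠ [] := by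
  simp [PySem.Str.split?, PySem.Chars.split?, PySem.Chars.splitOn, List.isEmpty]
  exact pvGoNeNil _ _ _ _ _

theorem pvFinish_append (acc : List (List String)) (st : List (List String) × List String) :
    pvFinish (acc ++ st.1, st.2) = acc ++ pvFinish st := by
  simp only [pvFinish]
  split <;> simp

theorem pvFoldAcc (ls : List String) : ∀ (acc : List (List String)) (cur : List String),
    List.foldl pvStep (acc, cur) ls
      = (acc ++ (List.foldl pvStep ([], cur) ls).1, (List.foldl pvStep ([], cur) ls).2) := by
  induction ls with
  | nil => intro acc cur; simp
  | cons l ls ih =>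
    intro acc cur
    cases hp : PySem.Str.startswith l "Frame" with
    | true =>
      have hstep : ∀ a : List (List String),
          pvStep (a, cur) l = (a ++ (if cur ≠ [] then [cur] else []), [l]) := by
        intro a; simp only [pvStep, hp, if_true]; split <;> simp
      simp only [List.foldl_cons, hstep, List.nil_append]
      rw [ih (acc ++ (if cur ≠ [] then [cur] else [])) [l],
        ih (if cur ≠ [] then [cur] else []) [l]]
      simp
    | false =>
      have hstep : ∀ a : List (List String), pvStep (a, cur) l = (a, cur ++ [l]) := by
        intro a; simp only [pvStep, hp, Bool.false_eq_true, if_false]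
      simp only [List.foldl_cons, hstep]
      rw [ih acc (cur ++ [l])]

theorem pvFinishFold (ls : List String) : ∀ (cur : List String),
    pvFinish (List.foldl pvStep ([], cur) ls) = pvR cur ls := by
  induction ls with
  | nil => intro cur; simp [pvFinish, pvR]
  | cons l ls ih =>
    intro cur
    cases hp : PySem.Str.startswith l "Frame" with
    | true =>
      have hstep : pvStep ([], cur) l = ((if cur ≠ [] then [cur] else []), [l]) := by
        simp only [pvStep, hp, if_true]; split <;> simp
      simp only [List.foldl_cons, hstep, pvR, hp, if_true]
      rw [pvFoldAcc ls (if cur ≠ [] then [cur] else []) [l]]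
      rw [pvFinish_append, ih [l]]
    | false =>
      have hstep : pvStep ([], cur) l = ([], cur ++ [l]) := by
        simp only [pvStep, hp, Bool.false_eq_true, if_false]
      simp only [List.foldl_cons, hstep, pvR, hp, Bool.false_eq_true, if_false]
      exact ih (cur ++ [l])

-- shifting all boundary indices by one while consing a line does not change the slices
theorem pvZipShift (nb : List Nat) (l : String) (ls : List String) :
    ((nb.map (· + 1)).zip ((nb.map (· + 1)).drop 1 ++ [ls.length + 1])).map
        (fun be => ((l :: ls).drop be.1).take (be.2 - be.1))
      = (nb.zip (nb.drop 1 ++ [ls.length])).map (fun be => (ls.drop be.1).take (be.2 - be.1)) := by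
  have h1 : (nb.map (· + 1)).drop 1 ++ [ls.length + 1] = (nb.drop 1 ++ [ls.length]).map (· + 1) := by
    simp [← List.map_drop]
  rw [h1, List.zip_map, List.map_map]
  apply List.map_congr_left
  intro be _
  simp [Nat.add_sub_add_right]

theorem pvSlices_cons_false (l : String) (ls : List String)
    (hp : PySem.Str.startswith l "Frame" = false) :
    pvSlices (l :: ls) = pvSlices ls := by
  simp only [pvSlices, pvNB, hp, Bool.false_eq_true, if_false, List.length_cons]
  exact pvZipShift (pvNB ls) l ls

theorem pvSlices_cons_true (l : String) (ls : List String)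
    (hp : PySem.Str.startswith l "Frame" = true) :
    pvSlices (l :: ls)
      = match pvNB ls with
        | [] => [l :: ls]
        | b0 :: _ => (l :: ls.take b0) :: pvSlices ls := by
  simp only [pvSlices, pvNB, hp, if_true, List.length_cons]
  cases hnb : pvNB ls with
  | nil => simp
  | cons b0 rest =>
    simp only [List.map_cons, List.drop_succ_cons, List.drop_zero]
    rw [List.cons_append, List.zip_cons_cons, List.map_cons]
    congr 1
    have h := pvZipShift (b0 :: rest) l ls
    simpa using h

theorem pvR_eq (ls : List String) : ∀ (cur : List String),
    pvR cur ls
      = match pvNB ls with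
        | [] => if cur ++ ls = [] then [] else [cur ++ ls]
        | b0 :: _ => (if cur = [] ∧ b0 = 0 then [] else [cur ++ ls.take b0]) ++ pvSlices ls := by
  induction ls with
  | nil =>
    intro cur
    simp only [pvNB, pvR, List.append_nil]
    by_cases h : cur = [] <;> simp [h]
  | cons l ls ih =>
    intro cur
    cases hp : PySem.Str.startswith l "Frame" with
    | true =>
      simp only [pvR, hp, if_true, pvNB, ih [l]]
      rw [pvSlices_cons_true l ls hp]
      cases hnb : pvNB ls with
      | nil => by_cases h : cur = [] <;> simp [h]
      | cons b0 rest => by_cases h : cur = [] <;> simp [h]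
    | false =>
      simp only [pvR, hp, Bool.false_eq_true, if_false, ih (cur ++ [l]), pvNB]
      rw [pvSlices_cons_false l ls hp]
      cases hnb : pvNB ls with
      | nil => simp
      | cons b0 rest => simp

-- B's boundary list is the Nat boundary list, cast and shifted by the enumerate start
theorem pvEnumBounds (ls : List String) : ∀ (s : Int),
    (PySem.List.enumerate ls s).filterMap
        (fun p => if PySem.Str.startswith p.2 "Frame" then some p.1 else none)
      = (pvNB ls).map (fun (n : Nat) => s + (n : Int)) := by
  induction ls with
  | nil => intro s; simp [PySem.List.enumerate_nil, pvNB]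
  | cons l ls ih =>
    intro s
    rw [PySem.List.enumerate_cons]
    cases hp : PySem.Str.startswith l "Frame" with
    | true =>
      simp only [List.filterMap_cons, hp, if_true, ih (s + 1), pvNB, List.map_cons, List.map_map]
      refine congrArg₂ List.cons (by simp) ?_
      apply List.map_congr_left; intro n _; simp; ring
    | false =>
      simp only [List.filterMap_cons, hp, Bool.false_eq_true, if_false, ih (s + 1), pvNB,
        List.map_map]
      apply List.map_congr_left; intro n _; simp; ring

theorem pvA_eq (content : String) :
    parse_frame_blocks content
      = pvR [] ((PySem.Str.split? content "\n").getD []) := by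
  show pvFinish (List.foldl pvStep ([], []) ((PySem.Str.split? content "\n").getD [])) = _
  exact pvFinishFold _ []

theorem pvB_eq (content : String) :
    parse_frame_blocks_alt content
      = (match pvNB ((PySem.Str.split? content "\n").getD []) with
         | [] => [(PySem.Str.split? content "\n").getD []]
         | b0 :: _ =>
           (if b0 = 0 then []
            else [((PySem.Str.split? content "\n").getD []).take b0])
             ++ pvSlices ((PySem.Str.split? content "\n").getD [])) := by
  simp only [parse_frame_blocks_alt]
  generalize (PySem.Str.split? content "\n").getD [] = lines
  rw [pvEnumBounds lines 0]
  have hcast : (pvNB lines).map (fun (n : Nat) => (0 : Int) + (n : Int))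
      = (pvNB lines).map (fun (n : Nat) => (n : Int)) := by
    apply List.map_congr_left; intro n _; omega
  rw [hcast]
  cases hnb : pvNB lines with
  | nil => simp
  | cons b0 rest =>
    simp only [List.map_cons]
    congr 1
    · -- head block
      by_cases h : b0 = 0
      · simp [h]
      · have hpos : (0 : Int) < (b0 : Int) := by omega
        rw [if_pos hpos, if_neg h, PySem.List.slice_to_natCast]
    · -- slice blocks
      rw [PySem.List.slice_from_one]
      have h2 : (((b0 : Int) :: rest.map (fun (n : Nat) => (n : Int))).tail ++ [(lines.length : Int)])
          = ((b0 :: rest).drop 1 ++ [lines.length]).map (fun (n : Nat) => (n : Int)) := by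
        simp
      rw [h2, show ((b0 : Int) :: rest.map (fun (n : Nat) => (n : Int)))
          = (b0 :: rest).map (fun (n : Nat) => (n : Int)) from by simp,
        List.zip_map, List.map_map]
      simp only [pvSlices, hnb]
      apply List.map_congr_left
      intro be _
      simp [PySem.List.slice_natCast]

-- ===== VERDICT (by name: the statement is the Claim_ definition above) =====
theorem parse_frame_blocks_spec : Claim_equal_parse_frame_blocks := by
  intro content _
  show parse_frame_blocks content = parse_frame_blocks_alt content
  rw [pvA_eq, pvB_eq, pvR_eq]
  have hne := pvLinesNeNil content
  cases hnb : pvNB ((PySem.Str.split? content "\n").getD []) with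
  | nil => simp [hne]
  | cons b0 rest =>
    by_cases h : b0 = 0 <;> simp [h]
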